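-- pv_equiv track=rewrite | github.com/lucas-larsson/aoc | 2025/python/day_06_improved.py | read_vertical_numbers
-- ===== SOURCE A (Python) =====
-- from typing import List
--
-- def read_vertical_numbers(segments: List[str]) -> List[int]:
--     """Helper: Read numbers by going vertically through character positions."""
--     if not segments:
--         return []
--
--     numbers = []
--     for char_pos in range(len(segments[0])):
--         digits = [seg[char_pos] for seg in segments if char_pos < len(seg) and seg[char_pos] != ' ']
--         if digits:
--             numbers.append(int(''.join(digits)))
--
--     return numbers
-- ===== SOURCE B (Python) =====
-- from typing import List
--
-- def read_vertical_numbers(segments: List[str]) -> List[int]: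
--     """Read numbers vertically: one row-major pass accumulating per-column buffers."""
--     if not segments:
--         return []
--     width = len(segments[0])
--     bufs = [''] * width
--     for seg in segments:
--         for i, c in enumerate(seg[:width]):
--             if c != ' ':
--                 bufs[i] += c
--     return [int(b) for b in bufs if b]
-- ===== Notes on version B (the rewrite author's own statement) =====
-- stated objective: alternative
-- what changed: B inverts the traversal: instead of A's column-outer loop that re-indexes every segment per position, B makes one row-major pass over the segments, appending each non-space character to a per-column string buffer, then parses the non-empty buffers.
import Mathlib
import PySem

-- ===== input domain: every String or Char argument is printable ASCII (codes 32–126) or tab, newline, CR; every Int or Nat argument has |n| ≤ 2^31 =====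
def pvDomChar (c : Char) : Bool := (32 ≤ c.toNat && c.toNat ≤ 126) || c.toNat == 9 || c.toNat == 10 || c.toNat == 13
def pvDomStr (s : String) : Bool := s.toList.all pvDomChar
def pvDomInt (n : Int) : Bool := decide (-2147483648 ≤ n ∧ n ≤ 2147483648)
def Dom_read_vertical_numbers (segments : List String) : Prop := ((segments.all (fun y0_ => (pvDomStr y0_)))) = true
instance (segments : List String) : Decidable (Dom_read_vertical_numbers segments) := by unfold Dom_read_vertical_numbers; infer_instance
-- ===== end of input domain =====

-- B inverts the traversal: one row-major pass appending each non-space char to a per-column buffer, then parses the non-empty buffers (objective: alternative).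

-- ===== PORT A =====
def read_vertical_numbers (segments : List String) : List Int :=
  if segments = [] then []
  else
    (PySem.List.pyRange 0 (PySem.Str.len segments.headI) 1).foldl
      (fun numbers char_pos =>
        -- digits = [seg[char_pos] for seg in segments if char_pos < len(seg) and seg[char_pos] != ' ']
        let digits := segments.filterMap (fun seg =>
          if char_pos < PySem.Str.len seg ∧ PySem.List.pyGetD seg.toList char_pos ' ' ≠ ' '
          then some (PySem.List.pyGetD seg.toList char_pos ' ') else none)
        -- numbers.append(int(''.join(digits)))  — int() raises outside Pre_, where .getD 0 is unclaimed
        if digits ≠ [] then numbers ++ [(PySem.Int.ofChars? digits).getD 0] else numbers)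
      []

-- ===== PORT B =====
-- inner loop body: 'if c != ' ': bufs[i] += c'  (i always in range in Python; pySetD is exact there)
def pvStep1 (bufs : List (List Char)) (ic : Int × Char) : List (List Char) :=
  if ic.2 ≠ ' '
  then PySem.List.pySetD bufs ic.1 (PySem.List.pyGetD bufs ic.1 [] ++ [ic.2])
  else bufs

-- body of 'for seg in segments': 'for i, c in enumerate(seg[:width]): …'  (seg[:width] = take width, width ≥ 0)
def pvStepRow (width : Nat) (bufs : List (List Char)) (seg : String) : List (List Char) :=
  (PySem.List.enumerate (seg.toList.take width) 0).foldl pvStep1 bufs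

def read_vertical_numbers_alt (segments : List String) : List Int :=
  if segments = [] then []
  else
    let width := segments.headI.toList.length   -- len(segments[0])
    let bufs := segments.foldl (pvStepRow width) (List.replicate width [])
    -- [int(b) for b in bufs if b]
    bufs.filterMap (fun b => if b ≠ [] then some ((PySem.Int.ofChars? b).getD 0) else none)

-- ===== PRECONDITION & SPEC =====
-- the non-space characters of vertical column i (the string both programs pass to int())
def pvColDigits (segments : List String) (i : Nat) : List Char :=
  (segments.map (fun seg => seg.toList.getD i ' ')).filter (fun c => c ≠ ' ')

-- Pre_ excludes exactly the inputs on which some non-empty column is not a valid int literal: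
-- there Python's int() raises ValueError in A (and B raises identically), so no value is claimed.
def Pre_read_vertical_numbers (segments : List String) : Prop :=
  ∀ i : Nat, i < segments.headI.toList.length →
    pvColDigits segments i = [] ∨ (PySem.Int.ofChars? (pvColDigits segments i)).isSome = true
instance (segments : List String) : Decidable (Pre_read_vertical_numbers segments) := by
  unfold Pre_read_vertical_numbers; infer_instance

def pvWitness_read_vertical_numbers : List String := ["1 3", "2 4"]

def Spec_read_vertical_numbers (segments : List String) (out : List Int) : Prop := out = read_vertical_numbers_alt segments
instance (segments : List String) (out : List Int) : Decidable (Spec_read_vertical_numbers segments out) := by unfold Spec_read_vertical_numbers; infer_instance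

-- ===== CLAIM (what is proved, stated in full; the proofs are below) =====
def Claim_equal_read_vertical_numbers : Prop := ∀ (segments : List String), Dom_read_vertical_numbers segments → Pre_read_vertical_numbers segments → Spec_read_vertical_numbers segments (read_vertical_numbers segments)

-- ===== LEMMAS AND PROOFS =====

-- A's per-position comprehension produces exactly the space-filtered column
lemma col_eq (segments : List String) (k : Nat) :
    segments.filterMap (fun seg =>
      if (k : Int) < PySem.Str.len seg ∧ PySem.List.pyGetD seg.toList (k : Int) ' ' ≠ ' '
      then some (PySem.List.pyGetD seg.toList (k : Int) ' ') else none)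
    = pvColDigits segments k := by
  unfold pvColDigits
  induction segments with
  | nil => rfl
  | cons s t ih =>
    have hlen : s.toList.length = s.length := String.length_toList
    simp [List.getD] at ih
    by_cases hk : k < s.length
    · have hk' : k < s.toList.length := by omega
      by_cases hsp : s.toList[k] = ' '
      · simp [List.getD, hk, hsp, ih]
      · simp [List.getD, hk, hsp, ih]
    · have hnone : s.toList[k]? = none := by rw [List.getElem?_eq_none_iff]; omega
      simp [List.getD, hk, ih]

-- the contribution of row character c at column j when it sits at position s
def pvExt (s : Nat) (cs : List Char) (j : Nat) : List Char :=
  if s ≤ j ∧ j - s < cs.length ∧ cs.getD (j - s) ' ' ≠ ' ' then [cs.getD (j - s) ' '] else []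

lemma pvExt_cons (s : Nat) (c : Char) (cs : List Char) (j : Nat) :
    pvExt s (c :: cs) j = (if j = s ∧ c ≠ ' ' then [c] else []) ++ pvExt (s + 1) cs j := by
  unfold pvExt
  rcases Nat.lt_trichotomy j s with hlt | heq | hgt
  · have h1 : ¬ (s ≤ j ∧ j - s < (c :: cs).length ∧ (c :: cs).getD (j - s) ' ' ≠ ' ') := by
      rintro ⟨h, -, -⟩; omega
    have h2 : ¬ (s + 1 ≤ j ∧ j - (s + 1) < cs.length ∧ cs.getD (j - (s + 1)) ' ' ≠ ' ') := by
      rintro ⟨h, -, -⟩; omega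
    rw [if_neg h1, if_neg h2, if_neg (by rintro ⟨h, -⟩; omega : ¬ (j = s ∧ c ≠ ' '))]
    rfl
  · subst heq
    have h2 : ¬ (j + 1 ≤ j ∧ j - (j + 1) < cs.length ∧ cs.getD (j - (j + 1)) ' ' ≠ ' ') := by
      rintro ⟨h, -, -⟩; omega
    rw [if_neg h2]
    have hz : j - j = 0 := by omega
    rw [hz]
    by_cases hc : c = ' '
    · rw [if_neg (by rintro ⟨-, -, h3⟩; exact h3 (by simp [hc])),
          if_neg (by rintro ⟨-, h⟩; exact h hc)]
      rfl
    · rw [if_pos ⟨le_refl j, by simp, by simpa using hc⟩, if_pos ⟨rfl, hc⟩]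
      simp
  · rw [if_neg (by rintro ⟨h, -⟩; omega : ¬ (j = s ∧ c ≠ ' '))]
    have hsub : j - s = (j - (s + 1)) + 1 := by omega
    rw [hsub]
    simp only [List.getD_cons_succ, List.length_cons, List.nil_append]
    have hiff : (s ≤ j ∧ j - (s+1) + 1 < cs.length + 1 ∧ cs.getD (j - (s+1)) ' ' ≠ ' ')
        ↔ (s + 1 ≤ j ∧ j - (s+1) < cs.length ∧ cs.getD (j - (s+1)) ' ' ≠ ' ') := by
      constructor <;> rintro ⟨h1, h2, h3⟩ <;> exact ⟨by omega, by omega, h3⟩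
    rw [if_congr hiff rfl rfl]

lemma length_foldl_step1 (l : List (Int × Char)) (bufs : List (List Char)) :
    (l.foldl pvStep1 bufs).length = bufs.length := by
  induction l generalizing bufs with
  | nil => rfl
  | cons p t ih =>
    rw [List.foldl_cons, ih]
    unfold pvStep1
    split
    · exact PySem.List.length_pySetD _ _ _
    · rfl

-- pointwise effect of the inner enumerate-fold
lemma inner_getD (cs : List Char) (s : Nat) (bufs : List (List Char))
    (h : s + cs.length ≤ bufs.length) (j : Nat) :
    ((PySem.List.enumerate cs (s : Int)).foldl pvStep1 bufs).getD j []
      = bufs.getD j [] ++ pvExt s cs j := by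
  induction cs generalizing s bufs with
  | nil =>
    have : pvExt s [] j = [] := by unfold pvExt; rw [if_neg]; rintro ⟨-, h2, -⟩; simp at h2
    simp [PySem.List.enumerate_nil, this]
  | cons c cs ih =>
    rw [PySem.List.enumerate_cons, List.foldl_cons]
    have hs : s < bufs.length := by simp only [List.length_cons] at h; omega
    have hstep : (pvStep1 bufs ((s : Int), c)).getD j []
        = bufs.getD j [] ++ (if j = s ∧ c ≠ ' ' then [c] else []) := by
      unfold pvStep1
      by_cases hc : c = ' '
      · simp [hc]
      · simp only [hc, ne_eq, not_false_iff, if_true, and_true]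
        rw [PySem.List.pySetD_natCast, PySem.List.pyGetD_natCast]
        by_cases hj : j = s
        · subst hj
          rw [List.getD_eq_getElem?_getD, List.getElem?_set_self (by omega), if_pos rfl]
          simp [List.getD_eq_getElem?_getD, List.getElem?_eq_getElem hs]
        · rw [List.getD_eq_getElem?_getD, List.getElem?_set_ne (by omega), if_neg hj,
              List.append_nil, List.getD_eq_getElem?_getD]
    have hlen : (pvStep1 bufs ((s : Int), c)).length = bufs.length := by
      unfold pvStep1; split
      · exact PySem.List.length_pySetD _ _ _
      · rfl
    have hcast : (s : Int) + 1 = ((s + 1 : Nat) : Int) := by push_cast; ring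
    rw [hcast, ih (s + 1) _ (by rw [hlen]; simp only [List.length_cons] at h; omega) , hstep, pvExt_cons,
        List.append_assoc]

lemma pvColDigits_nil (i : Nat) : pvColDigits [] i = [] := rfl

lemma pvColDigits_cons (seg : String) (rest : List String) (i : Nat) :
    pvColDigits (seg :: rest) i
      = (if seg.toList.getD i ' ' = ' ' then [] else [seg.toList.getD i ' ']) ++ pvColDigits rest i := by
  unfold pvColDigits
  rw [List.getD_eq_getElem?_getD]
  by_cases hc : seg.toList[i]?.getD ' ' = ' ' <;> simp [List.filter_cons, hc]

-- the outer row-fold builds exactly the columns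
lemma outer_eq (w : Nat) (segments : List String) :
    ∀ (bufs : List (List Char)), bufs.length = w →
      segments.foldl (pvStepRow w) bufs
        = (List.range w).map (fun i => bufs.getD i [] ++ pvColDigits segments i) := by
  induction segments with
  | nil =>
    intro bufs hb
    apply List.ext_getElem (by simp [hb])
    intro i h1 h2
    simp only [List.getElem_map, List.getElem_range, pvColDigits_nil, List.append_nil]
    rw [List.getD_eq_getElem?_getD, List.getElem?_eq_getElem (by simp [hb] at h1 ⊢; omega)]
    rfl
  | cons seg rest ih =>
    intro bufs hb
    rw [List.foldl_cons,
        ih (pvStepRow w bufs seg) (by unfold pvStepRow; rw [length_foldl_step1]; exact hb)]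
    apply List.map_congr_left
    intro i hi
    rw [List.mem_range] at hi
    have hcs : (seg.toList.take w).length ≤ bufs.length := by simp [hb]
    have hinner := inner_getD (seg.toList.take w) 0 bufs (by omega) i
    unfold pvStepRow
    rw [show ((0 : Int)) = ((0 : Nat) : Int) from rfl, hinner, pvColDigits_cons,
        List.append_assoc]
    congr 1
    -- pvExt 0 (take w seg) i = the single-char column contribution, for i < w
    unfold pvExt
    have hget : (seg.toList.take w).getD (i - 0) ' ' = seg.toList.getD i ' ' := by
      simp only [Nat.sub_zero]
      rw [List.getD_eq_getElem?_getD, List.getD_eq_getElem?_getD, List.getElem?_take]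
      simp [hi]
    rw [hget]
    by_cases hsp : seg.toList.getD i ' ' = ' '
    · rw [if_neg (by rintro ⟨-, -, h3⟩; exact h3 hsp), if_pos hsp]
    · have hlt : i - 0 < (seg.toList.take w).length := by
        simp only [List.length_take, Nat.sub_zero, lt_inf_iff]
        refine ⟨hi, ?_⟩
        by_contra hge
        rw [Nat.not_lt] at hge
        rw [List.getD_eq_getElem?_getD, List.getElem?_eq_none_iff.mpr (by omega)] at hsp
        exact hsp rfl
      rw [if_pos ⟨Nat.zero_le i, hlt, hsp⟩, if_neg hsp]

-- 'append f(x) when P x' fold = filterMap, generically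
lemma foldl_if_append_eq_filterMap {α β : Type} (l : List α) (P : α → Prop) [DecidablePred P]
    (f : α → β) (acc : List β) :
    l.foldl (fun acc x => if P x then acc ++ [f x] else acc) acc
      = acc ++ l.filterMap (fun x => if P x then some (f x) else none) := by
  induction l generalizing acc with
  | nil => simp
  | cons x t ih =>
    by_cases hx : P x <;> simp [List.foldl_cons, hx, ih]

-- ===== VERDICT (by name: the statement is the Claim_ definition above) =====
theorem read_vertical_numbers_spec : Claim_equal_read_vertical_numbers := by
  unfold Claim_equal_read_vertical_numbers
  intro segments _ _
  unfold Spec_read_vertical_numbers read_vertical_numbers read_vertical_numbers_alt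
  by_cases hne : segments = []
  · simp [hne]
  · simp only [hne, if_false]
    set w := segments.headI.toList.length with hw
    have hlen : PySem.Str.len segments.headI = ((w : Nat) : Int) := by
      simp [PySem.Str.len_eq, String.length_toList, hw]
    rw [hlen, PySem.List.pyRange_zero_nat, List.foldl_map,
        outer_eq w segments (List.replicate w []) (by simp)]
    have hcol : ∀ acc (k : Nat),
        (fun (numbers : List Int) (char_pos : Int) =>
          let digits := segments.filterMap (fun seg =>
            if char_pos < PySem.Str.len seg ∧ PySem.List.pyGetD seg.toList char_pos ' ' ≠ ' '
            then some (PySem.List.pyGetD seg.toList char_pos ' ') else none)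
          if digits ≠ [] then numbers ++ [(PySem.Int.ofChars? digits).getD 0] else numbers)
          acc (k : Int)
        = if pvColDigits segments k ≠ [] then acc ++ [(PySem.Int.ofChars? (pvColDigits segments k)).getD 0] else acc := by
      intro acc k
      simp only [col_eq segments k]
    calc (List.range w).foldl _ []
        = (List.range w).foldl (fun acc k =>
            if pvColDigits segments k ≠ [] then acc ++ [(PySem.Int.ofChars? (pvColDigits segments k)).getD 0] else acc) [] := by
          apply PySem.List.foldl_congr_mem
          intro acc k _
          exact hcol acc k
      _ = (List.range w).filterMap (fun k =>
            if pvColDigits segments k ≠ [] then some ((PySem.Int.ofChars? (pvColDigits segments k)).getD 0) else none) := by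
          rw [foldl_if_append_eq_filterMap]; simp
      _ = ((List.range w).map (fun i => (List.replicate w ([] : List Char)).getD i [] ++ pvColDigits segments i)).filterMap
            (fun b => if b ≠ [] then some ((PySem.Int.ofChars? b).getD 0) else none) := by
          rw [List.filterMap_map]
          apply List.filterMap_congr
          intro k hk
          rw [List.mem_range] at hk
          simp
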